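-- pv_equiv track=rewrite | github.com/Elggi/chrono_pendulum | host/stage2_settings.py | parse_feature_list
-- ===== SOURCE A (Python) =====
-- DEFAULT_FEATURES = [
--     "motor_input",
--     "theta",
--     "omega",
--     "theta2",
--     "omega2",
--     "tanh_omega_eps",
--     "motor_input_omega",
-- ]
--
-- def parse_feature_list(raw_features: list[str]) -> tuple[list[str], list[str]]:
--     warnings: list[str] = []
--     out = [str(s).strip() for s in raw_features if str(s).strip()]
--     if "1" in out:
--         warnings.append("feature '1' is forbidden and removed.")
--         out = [s for s in out if s != "1"]
--     unknown = [s for s in out if s not in DEFAULT_FEATURES]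
--     if unknown:
--         warnings.append(f"unsupported features removed: {unknown}")
--         out = [s for s in out if s in DEFAULT_FEATURES]
--     if not out:
--         out = list(DEFAULT_FEATURES)
--         warnings.append(f"fallback to default features: {out}")
--     return out, warnings
-- ===== SOURCE B (Python) =====
-- DEFAULT_FEATURES = [
--     "motor_input",
--     "theta",
--     "omega",
--     "theta2",
--     "omega2",
--     "tanh_omega_eps",
--     "motor_input_omega",
-- ]
--
-- def parse_feature_list(raw_features: list[str]) -> tuple[list[str], list[str]]:
--     # Single classifying pass instead of four filtering passes.
--     out: list[str] = []
--     unknown: list[str] = []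
--     forbidden = False
--     for s in raw_features:
--         t = str(s).strip()
--         if not t:
--             continue
--         if t == "1":
--             forbidden = True
--         elif t not in DEFAULT_FEATURES:
--             unknown.append(t)
--         else:
--             out.append(t)
--     warnings: list[str] = []
--     if forbidden:
--         warnings.append("feature '1' is forbidden and removed.")
--     if unknown:
--         warnings.append(f"unsupported features removed: {unknown}")
--     if not out:
--         out = list(DEFAULT_FEATURES)
--         warnings.append(f"fallback to default features: {out}")
--     return out, warnings
-- ===== Notes on version B (the rewrite author's own statement) =====
-- stated objective: alternative
-- what changed: A's four list passes (clean comprehension, forbidden-'1' membership test + filter, unknown filter, known filter) are fused into one classifying traversal that maintains out/unknown/forbidden state, with the warnings assembled afterwards in the same order.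
import Mathlib
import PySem

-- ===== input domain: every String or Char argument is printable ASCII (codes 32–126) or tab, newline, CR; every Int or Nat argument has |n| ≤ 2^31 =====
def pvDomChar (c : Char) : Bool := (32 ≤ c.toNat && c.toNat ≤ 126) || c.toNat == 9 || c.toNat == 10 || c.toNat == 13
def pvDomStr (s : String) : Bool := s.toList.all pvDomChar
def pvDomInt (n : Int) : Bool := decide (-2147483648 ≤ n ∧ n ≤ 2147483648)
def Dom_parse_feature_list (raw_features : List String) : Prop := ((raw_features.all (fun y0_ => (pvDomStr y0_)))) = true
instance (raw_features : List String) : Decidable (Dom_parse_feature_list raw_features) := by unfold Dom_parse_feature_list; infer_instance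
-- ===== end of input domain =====

-- B replaces A's four filtering passes over the list by one classifying pass (fold with
-- out/unknown/forbidden state); same return value, objective: simpler/alternative decomposition.

-- Python's repr(str) restricted to the ASCII+tab/newline/CR domain (shared f-string helper
-- for both ports; exact there: quote choice and \\ \' \" \t \n \r escapes).
def pvReprChars (cs : List Char) : List Char :=
  let q := if cs.contains '\'' && !(cs.contains '"') then '"' else '\''
  q :: cs.flatMap (fun c =>
    if c = '\\' then ['\\', '\\']
    else if c = q then ['\\', q]
    else if c = '\t' then ['\\', 't']
    else if c = '\n' then ['\\', 'n']
    else if c = '\r' then ['\\', 'r']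
    else [c]) ++ [q]

-- Python's f"{xs}" for xs : list[str]
def pvReprStrList (xs : List String) : String :=
  String.ofList ('[' :: PySem.Chars.join [',', ' '] (xs.map (fun s => pvReprChars s.toList)) ++ [']'])

def pvDefaults : List String :=
  ["motor_input", "theta", "omega", "theta2", "omega2", "tanh_omega_eps", "motor_input_omega"]

-- ===== PORT A =====
def parse_feature_list (raw_features : List String) : List String × List String :=
  let warnings : List String := []
  -- [str(s).strip() for s in raw_features if str(s).strip()]
  let out := raw_features.filterMap (fun s =>
    if PySem.Str.strip s = "" then none else some (PySem.Str.strip s))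
  let wo :=
    if out.contains "1" then
      (warnings ++ ["feature '1' is forbidden and removed."], out.filter (fun s => s != "1"))
    else (warnings, out)
  let warnings := wo.1
  let out := wo.2
  let unknown := out.filter (fun s => !(pvDefaults.contains s))
  let wo2 :=
    if unknown ≠ [] then
      (warnings ++ ["unsupported features removed: " ++ pvReprStrList unknown],
       out.filter (fun s => pvDefaults.contains s))
    else (warnings, out)
  let warnings := wo2.1
  let out := wo2.2
  if out = [] then
    (pvDefaults, warnings ++ ["fallback to default features: " ++ pvReprStrList pvDefaults])
  else (out, warnings)

-- ===== PORT B =====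
-- loop body of Source B's single pass; state = (out, unknown, forbidden)
def pvStepB (st : List String × List String × Bool) (s : String) : List String × List String × Bool :=
  if PySem.Str.strip s = "" then st
  else if PySem.Str.strip s = "1" then (st.1, st.2.1, true)
  else if !(pvDefaults.contains (PySem.Str.strip s)) then (st.1, st.2.1 ++ [PySem.Str.strip s], st.2.2)
  else (st.1 ++ [PySem.Str.strip s], st.2.1, st.2.2)

def parse_feature_list_alt (raw_features : List String) : List String × List String :=
  let st := raw_features.foldl pvStepB ([], [], false)
  let out := st.1
  let unknown := st.2.1
  let forbidden := st.2.2
  let warnings := (if forbidden then ["feature '1' is forbidden and removed."] else [])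
  let warnings := warnings ++
    (if unknown ≠ [] then ["unsupported features removed: " ++ pvReprStrList unknown] else [])
  if out = [] then
    (pvDefaults, warnings ++ ["fallback to default features: " ++ pvReprStrList pvDefaults])
  else (out, warnings)

-- ===== PRECONDITION & SPEC =====
def Spec_parse_feature_list (raw_features : List String) (out : List String × List String) : Prop := out = parse_feature_list_alt raw_features
instance (raw_features : List String) (out : List String × List String) : Decidable (Spec_parse_feature_list raw_features out) := by unfold Spec_parse_feature_list; infer_instance

-- ===== CLAIM (what is proved, stated in full; the proofs are below) =====
def Claim_equal_parse_feature_list : Prop := ∀ (raw_features : List String), Dom_parse_feature_list raw_features → Spec_parse_feature_list raw_features (parse_feature_list raw_features)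

-- ===== LEMMAS AND PROOFS =====

def pvClean (raw : List String) : List String :=
  raw.filterMap (fun s => if PySem.Str.strip s = "" then none else some (PySem.Str.strip s))

def pvKeep (t : String) : Bool := (t != "1") && pvDefaults.contains t
def pvUnk (t : String) : Bool := (t != "1") && !(pvDefaults.contains t)

lemma foldB_spec (raw : List String) : ∀ o u f,
    raw.foldl pvStepB (o, u, f) =
      (o ++ (pvClean raw).filter pvKeep, u ++ (pvClean raw).filter pvUnk,
       f || (pvClean raw).contains "1") := by
  induction raw with
  | nil => intro o u f; simp [pvClean]
  | cons s rest ih =>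
    intro o u f
    rw [List.foldl_cons]
    by_cases h0 : PySem.Str.strip s = ""
    · rw [show pvStepB (o, u, f) s = (o, u, f) from by simp [pvStepB, h0]]
      rw [ih o u f]
      simp [pvClean, h0]
    · by_cases h1 : PySem.Str.strip s = "1"
      · rw [show pvStepB (o, u, f) s = (o, u, true) from by simp [pvStepB, h1]]
        rw [ih o u true]
        simp [pvClean, h1, pvKeep, pvUnk]
      · have h1' : "1" ≠ PySem.Str.strip s := fun e => h1 e.symm
        by_cases h2 : pvDefaults.contains (PySem.Str.strip s) = true
        · have h2' : PySem.Str.strip s ∈ pvDefaults := List.contains_iff_mem.mp h2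
          rw [show pvStepB (o, u, f) s = (o ++ [PySem.Str.strip s], u, f) from by
            simp [pvStepB, h0, h1, h2']]
          rw [ih (o ++ [PySem.Str.strip s]) u f]
          simp [pvClean, h0, h1, h1', h2', pvKeep, pvUnk]
        · have h2' : PySem.Str.strip s ∉ pvDefaults := fun hm =>
            h2 (List.contains_iff_mem.mpr hm)
          rw [show pvStepB (o, u, f) s = (o, u ++ [PySem.Str.strip s], f) from by
            simp [pvStepB, h0, h1, h2']]
          rw [ih o (u ++ [PySem.Str.strip s]) f]
          simp [pvClean, h0, h1, h1', h2', pvKeep, pvUnk]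

lemma filter_contains_of_no_unknown (C : List String)
    (h : C.filter (fun s => !(pvDefaults.contains s)) = []) :
    C.filter (fun s => pvDefaults.contains s) = C := by
  apply List.filter_eq_self.mpr
  intro a ha
  have := List.filter_eq_nil_iff.mp h a ha
  simpa using this

lemma filter_unk_of_not_one (C : List String) (h : C.contains "1" = false) :
    C.filter pvUnk = C.filter (fun s => !(pvDefaults.contains s)) := by
  apply List.filter_congr
  intro a ha
  have hne : a ≠ "1" := by
    intro rfl'; subst rfl'
    have hx := List.contains_iff_mem.mpr ha
    rw [h] at hx
    exact Bool.noConfusion hx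
  simp [pvUnk, hne]

lemma filter_keep_of_not_one (C : List String) (h : C.contains "1" = false) :
    C.filter pvKeep = C.filter (fun s => pvDefaults.contains s) := by
  apply List.filter_congr
  intro a ha
  have hne : a ≠ "1" := by
    intro rfl'; subst rfl'
    have hx := List.contains_iff_mem.mpr ha
    rw [h] at hx
    exact Bool.noConfusion hx
  simp [pvKeep, hne]

lemma filter_contains_of_no_unknown' (C : List String) (h : C.filter pvUnk = []) :
    (C.filter (fun s => s != "1")).filter (fun s => pvDefaults.contains s)
      = C.filter (fun s => s != "1") := by
  apply List.filter_eq_self.mpr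
  intro a ha
  have ha' := List.mem_filter.mp ha
  have := List.filter_eq_nil_iff.mp h a ha'.1
  simp only [pvUnk, ha'.2, Bool.true_and] at this
  simpa using this

-- ===== VERDICT (by name: the statement is the Claim_ definition above) =====
theorem parse_feature_list_spec : Claim_equal_parse_feature_list := by
  intro raw _
  unfold Spec_parse_feature_list parse_feature_list parse_feature_list_alt
  rw [show (raw.filterMap fun s => if PySem.Str.strip s = "" then none
      else some (PySem.Str.strip s)) = pvClean raw from rfl]
  rw [foldB_spec raw [] [] false]
  simp only [List.nil_append, Bool.false_or]
  generalize pvClean raw = C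
  by_cases hc : C.contains "1" = true
  · simp only [hc, if_true]
    rw [List.filter_filter, List.filter_filter]
    rw [show (fun a => !pvDefaults.contains a && (a != "1")) = pvUnk from
      funext fun a => Bool.and_comm _ _]
    rw [show (fun a => pvDefaults.contains a && (a != "1")) = pvKeep from
      funext fun a => Bool.and_comm _ _]
    by_cases hu : C.filter pvUnk = []
    · have hk : List.filter pvKeep C = List.filter (fun s => s != "1") C := by
        rw [show pvKeep = (fun a => pvDefaults.contains a && (a != "1")) from
          funext fun a => Bool.and_comm _ _]
        rw [← List.filter_filter]
        exact filter_contains_of_no_unknown' C hu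
      simp only [hu, hk, ne_eq, not_true_eq_false, if_false, List.append_nil]
    · simp only [hu, ne_eq, not_false_eq_true, if_true]
  · have hcf : C.contains "1" = false := by simpa using hc
    simp only [hcf, Bool.false_eq_true, if_false, List.nil_append]
    rw [filter_unk_of_not_one C hcf, filter_keep_of_not_one C hcf]
    by_cases hu : C.filter (fun s => !(pvDefaults.contains s)) = []
    · have hk : C.filter (fun s => pvDefaults.contains s) = C :=
        filter_contains_of_no_unknown C hu
      simp only [hu, hk, ne_eq, not_true_eq_false, if_false]
    · simp only [hu, ne_eq, not_false_eq_true, if_true]
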